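-- pv_equiv track=rewrite | github.com/sf1tzp/symbology | management_discussion_summary.py | filter_summary
-- ===== SOURCE A (Python) =====
-- def filter_summary(summary):
--     # Remove the first line of the summary
--     lines = summary.split('\n')
--     if lines:
--         lines = lines[1:]
--
--     # Find the last line containing '---'
--     last_separator_index = None
--     for i in range(len(lines) - 1, -1, -1):
--         if '---' in lines[i]:
--             last_separator_index = i
--             break
--
--     # Remove that line and any lines thereafter
--     if last_separator_index is not None:
--         lines = lines[:last_separator_index]
--
--     # Join the remaining lines and return
--     return '\n'.join(lines)
-- ===== SOURCE B (Python) =====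
-- def filter_summary(summary):
--     # One forward pass with a flush buffer: lines before the last separator are
--     # flushed into `kept` each time a separator line appears; the separator and
--     # everything after it stay in `pending`. If no separator was seen, all lines
--     # are still in `pending`.
--     kept = []
--     pending = []
--     seen = False
--     for line in summary.split('\n')[1:]:
--         if '---' in line:
--             kept.extend(pending)
--             pending = [line]
--             seen = True
--         else:
--             pending.append(line)
--     return '\n'.join(kept if seen else pending)
-- ===== Notes on version B (the rewrite author's own statement) =====
-- stated objective: alternative
-- what changed: Replaced the reverse index scan for the last separator line (followed by a slice) with a single forward pass that maintains a kept list and a flush buffer, flushing the buffer into kept at each separator line; no index arithmetic or slicing remains.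
import Mathlib
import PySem

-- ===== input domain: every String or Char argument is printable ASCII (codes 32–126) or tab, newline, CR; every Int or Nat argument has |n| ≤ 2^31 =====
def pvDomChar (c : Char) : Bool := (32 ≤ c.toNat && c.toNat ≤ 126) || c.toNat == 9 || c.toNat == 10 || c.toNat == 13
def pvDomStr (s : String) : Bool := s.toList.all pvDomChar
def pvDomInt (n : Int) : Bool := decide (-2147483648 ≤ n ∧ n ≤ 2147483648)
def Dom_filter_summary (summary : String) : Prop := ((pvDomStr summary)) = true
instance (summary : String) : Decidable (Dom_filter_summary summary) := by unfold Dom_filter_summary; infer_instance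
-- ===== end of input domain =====

-- B replaces A's reverse index scan + slice by one forward pass with a flush buffer (alternative decomposition, same cost).

-- ===== PORT A =====
-- A's backward loop with break: scan the index list, stop at the first line containing "---"
def fsFind (lines : List String) : List Int → Option Int
  | [] => none
  | i :: rest =>
    match PySem.List.pyGet? lines i with
    | some l => if PySem.Str.isIn "---" l then some i else fsFind lines rest
    | none => none

def filter_summary (summary : String) : String :=
  let lines := (PySem.Str.split? summary "\n").getD []
  let lines := if lines.isEmpty then lines else PySem.List.slice lines (some 1) none
  match fsFind lines (PySem.List.pyRange ((lines.length : Int) - 1) (-1) (-1)) with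
  | some i => PySem.Str.join "\n" (PySem.List.slice lines none (some i))
  | none => PySem.Str.join "\n" lines

-- ===== PORT B =====
def fsStep (st : List String × List String × Bool) (line : String) :
    List String × List String × Bool :=
  if PySem.Str.isIn "---" line then (st.1 ++ st.2.1, [line], true)
  else (st.1, st.2.1 ++ [line], st.2.2)

def filter_summary_alt (summary : String) : String :=
  let lines := PySem.List.slice ((PySem.Str.split? summary "\n").getD []) (some 1) none
  let st := lines.foldl fsStep ([], [], false)
  PySem.Str.join "\n" (if st.2.2 then st.1 else st.2.1)

-- ===== PRECONDITION & SPEC =====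
def Spec_filter_summary (summary : String) (out : String) : Prop := out = filter_summary_alt summary
instance (summary : String) (out : String) : Decidable (Spec_filter_summary summary out) := by unfold Spec_filter_summary; infer_instance

-- ===== CLAIM (what is proved, stated in full; the proofs are below) =====
def Claim_equal_filter_summary : Prop := ∀ (summary : String), Dom_filter_summary summary → Spec_filter_summary summary (filter_summary summary)

-- ===== LEMMAS AND PROOFS =====

-- the common specification, a structural recursion on the REVERSED line list:
-- (kept-lines, a-separator-was-seen)
def fsCore : List String → List String × Bool
  | [] => ([], false)
  | x :: rest =>
    if PySem.Str.isIn "---" x then (rest.reverse, true)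
    else
      let c := fsCore rest
      (if c.2 then c.1 else c.1 ++ [x], c.2)

theorem fsStep_invariant (ls : List String) :
    let st := ls.foldl fsStep ([], [], false)
    st.1 ++ st.2.1 = ls ∧ st.2.2 = (fsCore ls.reverse).2 ∧
      (if st.2.2 then st.1 else st.2.1) = (fsCore ls.reverse).1 := by
  induction ls using List.reverseRecOn with
  | nil => simp [fsCore]
  | append_singleton ls x ih =>
    simp only [List.foldl_append, List.foldl_cons, List.foldl_nil] at *
    obtain ⟨h1, h2, h3⟩ := ih
    simp only [fsStep, List.reverse_append, List.reverse_cons, List.reverse_nil,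
      List.nil_append, List.cons_append, fsCore]
    simp only [PySem.Str.isIn_eq] at *
    by_cases hsep : PySem.Chars.isIn ['-', '-', '-'] x.toList = true
    · simp [hsep, h1]
    · simp [hsep]
      refine ⟨by rw [← List.append_assoc, h1], h2, ?_⟩
      rw [h2] at h3 ⊢
      rcases hb : (fsCore ls.reverse).2 with _ | _ <;> simp_all

theorem fsFind_mem {lines : List String} {idxs : List Int} {i : Int}
    (h : fsFind lines idxs = some i) : i ∈ idxs := by
  induction idxs with
  | nil => simp [fsFind] at h
  | cons j rest ih =>
    simp only [fsFind] at h
    rcases hg : PySem.List.pyGet? lines j with _ | l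
    · simp [hg] at h
    · simp only [hg] at h
      split_ifs at h with hs
      · simp_all
      · exact List.mem_cons_of_mem _ (ih h)

theorem fsFind_append {ls : List String} {x : String} {idxs : List Int}
    (h : ∀ i ∈ idxs, ∃ k : Nat, i = (k : Int) ∧ k < ls.length) :
    fsFind (ls ++ [x]) idxs = fsFind ls idxs := by
  induction idxs with
  | nil => rfl
  | cons j rest ih =>
    obtain ⟨k, hk, hklt⟩ := h j (List.mem_cons_self)
    subst hk
    simp only [fsFind, PySem.List.pyGet?_natCast]
    rw [List.getElem?_append_left hklt]
    rcases hg : ls[k]? with _ | l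
    · rfl
    · simp only [hg]
      split_ifs with hs
      · rfl
      · exact ih fun i hi => h i (List.mem_cons_of_mem _ hi)

theorem countdown_cons (n : Nat) :
    PySem.List.pyRange (n : Int) (-1) (-1) =
      (n : Int) :: PySem.List.pyRange ((n : Int) - 1) (-1) (-1) := by
  rw [PySem.List.pyRange_neg_one, PySem.List.pyRange_neg_one]
  have h1 : ((n : Int) - (-1)).toNat = n + 1 := by omega
  have h2 : ((n : Int) - 1 - (-1)).toNat = n := by omega
  rw [h1, h2, List.range_succ_eq_map]
  simp only [List.map_cons, List.map_map]
  congr 1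
  exact List.map_congr_left fun a ha => by
    simp only [Function.comp_apply]
    omega

theorem mem_countdown {n : Nat} {i : Int}
    (h : i ∈ PySem.List.pyRange ((n : Int) - 1) (-1) (-1)) :
    ∃ k : Nat, i = (k : Int) ∧ k < n := by
  rw [PySem.List.pyRange_neg_one] at h
  obtain ⟨j, hj, rfl⟩ := List.mem_map.mp h
  have hjlt := List.mem_range.mp hj
  exact ⟨n - 1 - j, by omega, by omega⟩

theorem fsFind_core (ls : List String) :
    (match fsFind ls (PySem.List.pyRange ((ls.length : Int) - 1) (-1) (-1)) with
      | some i => PySem.List.slice ls none (some i)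
      | none => ls) = (fsCore ls.reverse).1 ∧
    (fsFind ls (PySem.List.pyRange ((ls.length : Int) - 1) (-1) (-1))).isSome
      = (fsCore ls.reverse).2 := by
  induction ls using List.reverseRecOn with
  | nil => simp [fsFind, fsCore]
  | append_singleton ls x ih =>
    have hlen : (((ls ++ [x]).length : Int) - 1) = (ls.length : Int) := by
      simp
    rw [hlen, countdown_cons ls.length]
    simp only [fsFind, PySem.List.pyGet?_natCast, List.getElem?_append_right (le_refl _),
      Nat.sub_self, List.getElem?_cons_zero, List.reverse_append, List.reverse_cons,
      List.reverse_nil, List.nil_append, List.cons_append, fsCore]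
    obtain ⟨ih1, ih2⟩ := ih
    split_ifs with hsep hcore
    · simp [PySem.List.slice_to_natCast]
    · rw [fsFind_append (fun i hi => mem_countdown hi)]
      rcases hf : fsFind ls (PySem.List.pyRange ((ls.length : Int) - 1) (-1) (-1)) with _ | i
      · rw [hf, hcore] at ih2
        simp at ih2
      · obtain ⟨k, hk, hklt⟩ := mem_countdown (fsFind_mem hf)
        subst hk
        rw [hf] at ih1 ih2
        refine ⟨?_, by simp [hcore]⟩
        simp only [← ih1]
        rw [PySem.List.slice_to_natCast, PySem.List.slice_to_natCast,
          List.take_append_of_le_length (by omega)]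
    · rw [fsFind_append (fun i hi => mem_countdown hi)]
      rcases hf : fsFind ls (PySem.List.pyRange ((ls.length : Int) - 1) (-1) (-1)) with _ | i
      · rw [hf] at ih1 ih2
        exact ⟨by rw [← ih1], by simpa using ih2⟩
      · rw [hf] at ih2
        simp only [Option.isSome_some] at ih2
        exact absurd ih2.symm hcore

-- ===== VERDICT (by name: the statement is the Claim_ definition above) =====
theorem filter_summary_spec : Claim_equal_filter_summary := by
  intro summary _
  unfold Spec_filter_summary filter_summary filter_summary_alt
  dsimp only
  set lines0 := (PySem.Str.split? summary "\n").getD [] with hl0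
  have hne : (if lines0.isEmpty then lines0 else PySem.List.slice lines0 (some 1) none)
      = PySem.List.slice lines0 (some 1) none := by
    rcases lines0 with _ | ⟨a, rest⟩ <;> simp [PySem.List.slice_from_one]
  rw [hne]
  set ls := PySem.List.slice lines0 (some 1) none with hls
  obtain ⟨-, -, h3⟩ := fsStep_invariant ls
  obtain ⟨hc1, -⟩ := fsFind_core ls
  rw [h3]
  rcases hf : fsFind ls (PySem.List.pyRange ((ls.length : Int) - 1) (-1) (-1)) with _ | i <;>
    simp only [hf] at hc1 ⊢ <;> exact congrArg _ hc1
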